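-- pv_equiv track=rewrite | github.com/mityagz/pyneng | exercise/09/92.py | generate_trunk_config
-- ===== SOURCE A (Python) =====
-- def generate_trunk_config(trunk):
--     '''
--     trunk - словарь trunk-портов, для которых необходимо сгенерировать конфигурацию
--     Возвращает список всех команд, которые были сгенерированы на основе шаблона
--     '''
--     trunk_template = [
--         'switchport trunk encapsulation dot1q', 'switchport mode trunk',
--         'switchport trunk native vlan 999', 'switchport trunk allowed vlan'
--     ]
--
--     result = []
--
--     for iface, vlan_list in trunk.items():
--         result.append(("interface {}".format(iface)))
--         for l in trunk_template:
--             if l.endswith("allowed vlan"):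
--                 l += " {}"
--                 result.append(l.format(",".join(str(v) for v in vlan_list)))
--             else:
--                 result.append(l)
--
--     return result
-- ===== SOURCE B (Python) =====
-- def generate_trunk_config(trunk):
--     n = len(trunk)
--     out = [None] * (5 * n)
--     out[0::5] = ["interface " + iface for iface in trunk]
--     out[1::5] = ["switchport trunk encapsulation dot1q"] * n
--     out[2::5] = ["switchport mode trunk"] * n
--     out[3::5] = ["switchport trunk native vlan 999"] * n
--     out[4::5] = ["switchport trunk allowed vlan " + ",".join(str(v) for v in vlan_list)
--                  for vlan_list in trunk.values()]
--     return out
-- ===== Notes on version B (the rewrite author's own statement) =====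
-- stated objective: alternative
-- what changed: Replaces A's row-wise template loop with a columnar construction: five separate column lists (one per output line kind) are built in staged passes and interleaved into the result via extended-slice assignment.
import Mathlib
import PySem

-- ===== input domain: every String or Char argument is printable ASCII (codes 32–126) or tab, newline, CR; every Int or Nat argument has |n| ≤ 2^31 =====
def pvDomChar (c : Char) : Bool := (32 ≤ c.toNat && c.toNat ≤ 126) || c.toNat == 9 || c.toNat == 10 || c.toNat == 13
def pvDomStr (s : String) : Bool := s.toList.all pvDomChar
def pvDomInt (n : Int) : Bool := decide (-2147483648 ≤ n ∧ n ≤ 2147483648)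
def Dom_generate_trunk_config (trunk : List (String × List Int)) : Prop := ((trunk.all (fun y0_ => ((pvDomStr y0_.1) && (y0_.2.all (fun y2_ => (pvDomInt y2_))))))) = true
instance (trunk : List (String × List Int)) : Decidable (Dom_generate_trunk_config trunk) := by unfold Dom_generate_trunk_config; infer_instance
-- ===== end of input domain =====

-- B builds the result columnar: five per-kind column lists, interleaved into the output (Python slice assignment).
-- The dict argument is modelled as an association list iterated in order; return-value equivalence only.

-- ===== PORT A =====
-- A's trunk_template literal
def pvTrunkTemplate : List String :=
  ["switchport trunk encapsulation dot1q", "switchport mode trunk",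
   "switchport trunk native vlan 999", "switchport trunk allowed vlan"]

def generate_trunk_config (trunk : List (String × List Int)) : List String :=
  trunk.foldl (fun result p =>
    let result := result ++ ["interface " ++ p.1]
    pvTrunkTemplate.foldl (fun res l =>
      if PySem.Str.endswith l "allowed vlan" then
        res ++ [(l ++ " ") ++ PySem.Str.join "," (p.2.map PySem.Int.toStr)]
      else
        res ++ [l]) result) []

-- ===== PORT B =====
-- out[0::5] = c0, out[1::5] = c1, …, out[4::5] = c4 : interleave the five columns
def pvInterleave5 : List String → List String → List String → List String → List String → List String
  | a :: as, b :: bs, c :: cs, d :: ds, e :: es => a :: b :: c :: d :: e :: pvInterleave5 as bs cs ds es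
  | _, _, _, _, _ => []

def generate_trunk_config_alt (trunk : List (String × List Int)) : List String :=
  let n := trunk.length
  pvInterleave5
    (trunk.map (fun p => "interface " ++ p.1))
    (List.replicate n "switchport trunk encapsulation dot1q")
    (List.replicate n "switchport mode trunk")
    (List.replicate n "switchport trunk native vlan 999")
    (trunk.map (fun p => "switchport trunk allowed vlan " ++ PySem.Str.join "," (p.2.map PySem.Int.toStr)))

-- ===== PRECONDITION & SPEC =====
def Spec_generate_trunk_config (trunk : List (String × List Int)) (out : List String) : Prop := out = generate_trunk_config_alt trunk
instance (trunk : List (String × List Int)) (out : List String) : Decidable (Spec_generate_trunk_config trunk out) := by unfold Spec_generate_trunk_config; infer_instance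

-- ===== CLAIM (what is proved, stated in full; the proofs are below) =====
def Claim_equal_generate_trunk_config : Prop := ∀ (trunk : List (String × List Int)), Dom_generate_trunk_config trunk → Spec_generate_trunk_config trunk (generate_trunk_config trunk)

-- ===== LEMMAS AND PROOFS =====

-- the inner template loop appends exactly the four fixed lines
theorem pv_template_step (res : List String) (vl : List Int) :
    pvTrunkTemplate.foldl (fun res l =>
      if PySem.Str.endswith l "allowed vlan" then
        res ++ [(l ++ " ") ++ PySem.Str.join "," (vl.map PySem.Int.toStr)]
      else res ++ [l]) res
    = res ++ ["switchport trunk encapsulation dot1q", "switchport mode trunk",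
              "switchport trunk native vlan 999",
              "switchport trunk allowed vlan " ++ PySem.Str.join "," (vl.map PySem.Int.toStr)] := by
  have h1 : PySem.Str.endswith "switchport trunk encapsulation dot1q" "allowed vlan" = false := by decide
  have h2 : PySem.Str.endswith "switchport mode trunk" "allowed vlan" = false := by decide
  have h3 : PySem.Str.endswith "switchport trunk native vlan 999" "allowed vlan" = false := by decide
  have h4 : PySem.Str.endswith "switchport trunk allowed vlan" "allowed vlan" = true := by decide
  simp only [pvTrunkTemplate, List.foldl, h1, h2, h3, h4, Bool.false_eq_true, if_true, if_false]
  simp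

-- B's columnar result unfolds one row at a time
theorem pv_alt_cons (p : String × List Int) (t : List (String × List Int)) :
    generate_trunk_config_alt (p :: t)
    = ("interface " ++ p.1) :: "switchport trunk encapsulation dot1q" ::
      "switchport mode trunk" :: "switchport trunk native vlan 999" ::
      ("switchport trunk allowed vlan " ++ PySem.Str.join "," (p.2.map PySem.Int.toStr)) ::
      generate_trunk_config_alt t := by
  simp [generate_trunk_config_alt, List.replicate_succ, pvInterleave5]

theorem pv_foldl_eq_alt (trunk : List (String × List Int)) (acc : List String) :
    trunk.foldl (fun result p =>
      pvTrunkTemplate.foldl (fun res l =>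
        if PySem.Str.endswith l "allowed vlan" then
          res ++ [(l ++ " ") ++ PySem.Str.join "," (p.2.map PySem.Int.toStr)]
        else res ++ [l]) (result ++ ["interface " ++ p.1])) acc
    = acc ++ generate_trunk_config_alt trunk := by
  induction trunk generalizing acc with
  | nil => simp [generate_trunk_config_alt, pvInterleave5]
  | cons p t ih =>
    rw [List.foldl_cons, pv_template_step, ih, pv_alt_cons]
    simp

-- ===== VERDICT (by name: the statement is the Claim_ definition above) =====
theorem generate_trunk_config_spec : Claim_equal_generate_trunk_config := by
  intro trunk _
  show generate_trunk_config trunk = generate_trunk_config_alt trunk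
  simpa [generate_trunk_config] using pv_foldl_eq_alt trunk []
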